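-- pv_equiv track=rewrite | github.com/Edmond120/graph_scripts | full_bipartite_degree_sequences.py | degree_sequence
-- ===== SOURCE A (Python) =====
-- def degree_sequence(full_bipartite_graph):
-- 	sequence = []
-- 	for complete_bipartite_graph in full_bipartite_graph:
-- 		left, right = complete_bipartite_graph
-- 		for _ in range(left):
-- 			sequence.append(right)
-- 		for _ in range(right):
-- 			sequence.append(left)
-- 	sequence.sort(reverse=True)
-- 	return tuple(sequence)
-- ===== SOURCE B (Python) =====
-- def degree_sequence(full_bipartite_graph):
--     counts = {}
--     for left, right in full_bipartite_graph:
--         if left > 0: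
--             counts[right] = counts.get(right, 0) + left
--         if right > 0:
--             counts[left] = counts.get(left, 0) + right
--     sequence = []
--     for value in sorted(counts, reverse=True):
--         sequence.extend([value] * counts[value])
--     return tuple(sequence)
-- ===== Notes on version B (the rewrite author's own statement) =====
-- stated objective: alternative
-- what changed: B replaces A's materialise-every-degree-then-comparison-sort with a counting sort: one pass aggregates value->multiplicity in a dict, then distinct values are emitted in descending order with their multiplicities; only the distinct values get sorted.
import Mathlib
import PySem

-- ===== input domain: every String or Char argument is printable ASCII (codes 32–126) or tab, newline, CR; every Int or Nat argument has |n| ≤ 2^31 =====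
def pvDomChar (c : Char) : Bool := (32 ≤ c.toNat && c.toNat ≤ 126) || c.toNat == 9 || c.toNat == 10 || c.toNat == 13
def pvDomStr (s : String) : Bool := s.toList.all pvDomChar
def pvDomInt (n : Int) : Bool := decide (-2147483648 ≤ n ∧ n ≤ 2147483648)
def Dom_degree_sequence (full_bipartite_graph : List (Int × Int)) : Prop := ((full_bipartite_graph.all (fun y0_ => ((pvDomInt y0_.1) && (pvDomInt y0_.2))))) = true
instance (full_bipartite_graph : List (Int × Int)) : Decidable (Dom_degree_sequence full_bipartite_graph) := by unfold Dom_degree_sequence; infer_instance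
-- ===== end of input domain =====

-- B replaces A's "materialise every degree then comparison-sort" with a counting sort:
-- one pass aggregates value → multiplicity in a dict, then the distinct values are emitted
-- in descending order with their multiplicities (objective: alternative; sorts only the distinct values).

-- ===== PORT A =====
def degree_sequence (full_bipartite_graph : List (Int × Int)) : List Int :=
  let sequence : List Int := []
  let sequence := full_bipartite_graph.foldl (fun seq complete_bipartite_graph =>
    let left := complete_bipartite_graph.1
    let right := complete_bipartite_graph.2
    let seq := (PySem.List.pyRange 0 left 1).foldl (fun s _ => s ++ [right]) seq
    let seq := (PySem.List.pyRange 0 right 1).foldl (fun s _ => s ++ [left]) seq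
    seq) sequence
  PySem.List.sorted sequence (fun x => x) true

-- ===== PORT B =====
def degree_sequence_alt (full_bipartite_graph : List (Int × Int)) : List Int :=
  let counts : PySem.Dict Int Int := full_bipartite_graph.foldl (fun counts p =>
    let counts := if p.1 > 0 then counts.modify p.2 0 (· + p.1) else counts
    let counts := if p.2 > 0 then counts.modify p.1 0 (· + p.2) else counts
    counts) PySem.Dict.empty
  (PySem.List.sorted counts.keys (fun x => x) true).foldl
    (fun seq v => seq ++ PySem.List.pyRepeat [v] (counts.getD v 0)) []

-- ===== PRECONDITION & SPEC =====
def Spec_degree_sequence (full_bipartite_graph : List (Int × Int)) (out : List Int) : Prop := out = degree_sequence_alt full_bipartite_graph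
instance (full_bipartite_graph : List (Int × Int)) (out : List Int) : Decidable (Spec_degree_sequence full_bipartite_graph out) := by unfold Spec_degree_sequence; infer_instance

-- ===== CLAIM (what is proved, stated in full; the proofs are below) =====
def Claim_equal_degree_sequence : Prop := ∀ (full_bipartite_graph : List (Int × Int)), Dom_degree_sequence full_bipartite_graph → Spec_degree_sequence full_bipartite_graph (degree_sequence full_bipartite_graph)

-- ===== LEMMAS AND PROOFS =====

/-- The multiset of degrees A accumulates before sorting. -/
def pvRaw (g : List (Int × Int)) : List Int :=
  g.flatMap (fun p => List.replicate p.1.toNat p.2 ++ List.replicate p.2.toNat p.1)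

/-- B's aggregation step over one pair. -/
def pvStep (d : PySem.Dict Int Int) (p : Int × Int) : PySem.Dict Int Int :=
  let d := if p.1 > 0 then d.modify p.2 0 (· + p.1) else d
  if p.2 > 0 then d.modify p.1 0 (· + p.2) else d

lemma pvA_eq_sorted_raw (g : List (Int × Int)) :
    degree_sequence g = PySem.List.sorted (pvRaw g) (fun x => x) true := by
  have key : ∀ (t : List (Int × Int)) (acc : List Int),
      t.foldl (fun seq q =>
        (PySem.List.pyRange 0 q.2 1).foldl (fun s _ => s ++ [q.1])
          ((PySem.List.pyRange 0 q.1 1).foldl (fun s _ => s ++ [q.2]) seq)) acc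
      = acc ++ t.flatMap (fun q => List.replicate q.1.toNat q.2 ++ List.replicate q.2.toNat q.1) := by
    intro t
    induction t with
    | nil => intro acc; simp
    | cons q u ihu =>
        intro acc
        simp only [List.foldl_cons, List.flatMap_cons]
        rw [PySem.List.foldl_append_singleton_eq_map, PySem.List.foldl_append_singleton_eq_map]
        have hq1 : (PySem.List.pyRange 0 q.1 1).map (fun _ => q.2) = List.replicate q.1.toNat q.2 := by simp
        have hq2 : (PySem.List.pyRange 0 q.2 1).map (fun _ => q.1) = List.replicate q.2.toNat q.1 := by simp
        rw [hq1, hq2, ihu]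
        simp [List.append_assoc]
  show PySem.List.sorted (g.foldl (fun seq q =>
        (PySem.List.pyRange 0 q.2 1).foldl (fun s _ => s ++ [q.1])
          ((PySem.List.pyRange 0 q.1 1).foldl (fun s _ => s ++ [q.2]) seq)) []) (fun x => x) true
      = PySem.List.sorted (pvRaw g) (fun x => x) true
  rw [key g [], pvRaw]
  simp

lemma pvStep_getD (d : PySem.Dict Int Int) (p : Int × Int) (v : Int) :
    (pvStep d p).getD v 0
      = d.getD v 0 + ((List.replicate p.1.toNat p.2 ++ List.replicate p.2.toNat p.1).count v : Int) := by
  obtain ⟨l, r⟩ := p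
  unfold pvStep
  simp only [List.count_append, List.count_replicate]
  by_cases hl : l > 0 <;> by_cases hr : r > 0 <;>
    simp only [hl, hr, if_pos, ite_false]
  · by_cases hrv : r = v <;> by_cases hlv : l = v
    · subst hrv; subst hlv
      rw [PySem.Dict.getD_modify_self, PySem.Dict.getD_modify_self]
      simp only [beq_self_eq_true, if_pos]
      omega
    · subst hrv
      rw [PySem.Dict.getD_modify_of_ne _ _ _ (by omega : r ≠ l), PySem.Dict.getD_modify_self]
      have : (l == r) = false := by simp; omega
      simp [this]
      omega
    · subst hlv
      rw [PySem.Dict.getD_modify_self, PySem.Dict.getD_modify_of_ne _ _ _ (by omega : l ≠ r)]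
      have : (r == l) = false := by simp; omega
      simp [this]
      omega
    · rw [PySem.Dict.getD_modify_of_ne _ _ _ (by omega : v ≠ l),
        PySem.Dict.getD_modify_of_ne _ _ _ (by omega : v ≠ r)]
      have h1 : (r == v) = false := by simp; omega
      have h2 : (l == v) = false := by simp; omega
      simp [h1, h2]
  · have h0 : r.toNat = 0 := by omega
    by_cases hrv : r = v
    · subst hrv
      rw [PySem.Dict.getD_modify_self]
      simp [h0]
      omega
    · rw [PySem.Dict.getD_modify_of_ne _ _ _ (by omega : v ≠ r)]
      have h1 : (r == v) = false := by simp; omega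
      simp [h1, h0]
  · have h0 : l.toNat = 0 := by omega
    by_cases hlv : l = v
    · subst hlv
      rw [PySem.Dict.getD_modify_self]
      simp [h0]
      omega
    · rw [PySem.Dict.getD_modify_of_ne _ _ _ (by omega : v ≠ l)]
      have h1 : (l == v) = false := by simp; omega
      simp [h1, h0]
  · have h1 : l.toNat = 0 := by omega
    have h2 : r.toNat = 0 := by omega
    simp [h1, h2]

lemma pvStep_mem_keys (d : PySem.Dict Int Int) (p : Int × Int) (v : Int) :
    v ∈ (pvStep d p).keys ↔
      v ∈ d.keys ∨ v ∈ List.replicate p.1.toNat p.2 ++ List.replicate p.2.toNat p.1 := by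
  obtain ⟨l, r⟩ := p
  unfold pvStep
  by_cases hl : l > 0 <;> by_cases hr : r > 0
  · have h1 : l.toNat ≠ 0 := by omega
    have h2 : r.toNat ≠ 0 := by omega
    simp [hl, hr, PySem.Dict.keys_modify, PySem.Dict.mem_keys_insert, List.mem_replicate, h1, h2]
    tauto
  · have h1 : l.toNat ≠ 0 := by omega
    have h2 : r.toNat = 0 := by omega
    simp [hl, hr, PySem.Dict.keys_modify, PySem.Dict.mem_keys_insert, List.mem_replicate, h1, h2]
    tauto
  · have h1 : l.toNat = 0 := by omega
    have h2 : r.toNat ≠ 0 := by omega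
    simp [hl, hr, PySem.Dict.keys_modify, PySem.Dict.mem_keys_insert, List.mem_replicate, h1, h2]
    tauto
  · have h1 : l.toNat = 0 := by omega
    have h2 : r.toNat = 0 := by omega
    simp [hl, hr, h1, h2]

lemma pvStep_nodup (d : PySem.Dict Int Int) (p : Int × Int) (h : d.keys.Nodup) :
    (pvStep d p).keys.Nodup := by
  obtain ⟨l, r⟩ := p
  unfold pvStep
  by_cases hl : l > 0 <;> by_cases hr : r > 0 <;> simp only [hl, hr, ite_true, ite_false] <;>
    first
      | exact (by
          simp only [PySem.Dict.keys_modify]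
          exact PySem.Dict.nodup_keys_insert _ _ _ (by
            simp only [PySem.Dict.keys_modify]
            exact PySem.Dict.nodup_keys_insert _ _ _ h))
      | exact (by
          simp only [PySem.Dict.keys_modify]
          exact PySem.Dict.nodup_keys_insert _ _ _ h)
      | exact h

lemma pvFold_getD (g : List (Int × Int)) :
    ∀ (d : PySem.Dict Int Int) (v : Int),
      (g.foldl pvStep d).getD v 0 = d.getD v 0 + ((pvRaw g).count v : Int) := by
  induction g with
  | nil => intro d v; simp [pvRaw]
  | cons p t ih =>
      intro d v
      simp only [List.foldl_cons]
      rw [ih, pvStep_getD]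
      simp only [pvRaw, List.flatMap_cons, List.count_append]
      push_cast
      ring

lemma pvFold_mem_keys (g : List (Int × Int)) :
    ∀ (d : PySem.Dict Int Int) (v : Int),
      v ∈ (g.foldl pvStep d).keys ↔ v ∈ d.keys ∨ v ∈ pvRaw g := by
  induction g with
  | nil => intro d v; simp [pvRaw]
  | cons p t ih =>
      intro d v
      simp only [List.foldl_cons]
      rw [ih, pvStep_mem_keys]
      simp only [pvRaw, List.flatMap_cons, List.mem_append]
      tauto

lemma pvFold_nodup (g : List (Int × Int)) :
    ∀ (d : PySem.Dict Int Int), d.keys.Nodup → (g.foldl pvStep d).keys.Nodup := by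
  induction g with
  | nil => intro d h; exact h
  | cons p t ih => intro d h; exact ih _ (pvStep_nodup d p h)

lemma pvCount_flatMap_replicate (n : Int → Nat) (v : Int) :
    ∀ (ks : List Int), ks.Nodup →
      (ks.flatMap (fun k => List.replicate (n k) k)).count v = if v ∈ ks then n v else 0 := by
  intro ks
  induction ks with
  | nil => intro _; simp
  | cons k t ih =>
      intro hnd
      rcases List.nodup_cons.mp hnd with ⟨hk, ht⟩
      simp only [List.flatMap_cons, List.count_append, List.count_replicate, ih ht, List.mem_cons]
      by_cases hkv : k = v
      · subst hkv
        simp [hk]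
      · have : (k == v) = false := by simp [hkv]
        simp [this, Ne.symm hkv]

lemma pvPairwise_flatMap_replicate (n : Int → Nat) :
    ∀ (ks : List Int), ks.Pairwise (fun a b => b ≤ a) →
      (ks.flatMap (fun k => List.replicate (n k) k)).Pairwise (fun a b => b ≤ a) := by
  intro ks
  induction ks with
  | nil => intro _; simp
  | cons k t ih =>
      intro hp
      rcases List.pairwise_cons.mp hp with ⟨hhead, htail⟩
      simp only [List.flatMap_cons]
      rw [List.pairwise_append]
      refine ⟨?_, ih htail, ?_⟩
      · exact List.pairwise_replicate.mpr (Or.inr (le_refl k))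
      · intro a ha b hb
        rcases List.mem_flatMap.mp hb with ⟨k', hk't, hb'⟩
        have hak : a = k := (List.mem_replicate.mp ha).2
        have hbk : b = k' := (List.mem_replicate.mp hb').2
        rw [hak, hbk]
        exact hhead k' hk't

lemma pvB_eq_flatMap (g : List (Int × Int)) :
    degree_sequence_alt g
      = (PySem.List.sorted (g.foldl pvStep PySem.Dict.empty).keys (fun x => x) true).flatMap
          (fun v => List.replicate ((g.foldl pvStep PySem.Dict.empty).getD v 0).toNat v) := by
  unfold degree_sequence_alt
  have hfold : ∀ (d : PySem.Dict Int Int),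
      g.foldl (fun counts p =>
        let counts := if p.1 > 0 then counts.modify p.2 0 (· + p.1) else counts
        if p.2 > 0 then counts.modify p.1 0 (· + p.2) else counts) d = g.foldl pvStep d := by
    intro d; rfl
  rw [hfold]
  have := PySem.List.foldl_append_eq_flatMap
    (fun v => PySem.List.pyRepeat [v] ((g.foldl pvStep PySem.Dict.empty).getD v 0))
    (PySem.List.sorted (g.foldl pvStep PySem.Dict.empty).keys (fun x => x) true) []
  simp only [List.nil_append] at this
  rw [this]
  congr 1
  funext v
  exact PySem.List.pyRepeat_singleton v _

lemma pvB_perm_raw (g : List (Int × Int)) : (degree_sequence_alt g).Perm (pvRaw g) := by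
  rw [pvB_eq_flatMap]
  rw [List.perm_iff_count]
  intro v
  set d := g.foldl pvStep PySem.Dict.empty with hd
  have hnd : d.keys.Nodup := pvFold_nodup g _ (by simp [PySem.Dict.keys_empty])
  have hndS : (PySem.List.sorted d.keys (fun x => x) true).Nodup := by
    exact (PySem.List.sorted_perm d.keys (fun x => x) true).nodup_iff.mpr hnd
  rw [pvCount_flatMap_replicate (fun k => (d.getD k 0).toNat) v _ hndS]
  have hmemS : v ∈ PySem.List.sorted d.keys (fun x => x) true ↔ v ∈ d.keys :=
    PySem.List.mem_sorted _ _ _ _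
  have hmem : v ∈ d.keys ↔ v ∈ pvRaw g := by
    rw [hd, pvFold_mem_keys]
    simp [PySem.Dict.keys_empty]
  have hcnt : d.getD v 0 = ((pvRaw g).count v : Int) := by
    rw [hd, pvFold_getD]; simp
  by_cases hv : v ∈ pvRaw g
  · rw [if_pos (hmemS.mpr (hmem.mpr hv)), hcnt]
    simp
  · rw [if_neg (fun h => hv (hmem.mp (hmemS.mp h)))]
    exact (List.count_eq_zero.mpr hv).symm

lemma pvB_pairwise (g : List (Int × Int)) :
    (degree_sequence_alt g).Pairwise (fun a b => b ≤ a) := by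
  rw [pvB_eq_flatMap]
  exact pvPairwise_flatMap_replicate _ _
    (PySem.List.sorted_pairwise_rev (g.foldl pvStep PySem.Dict.empty).keys (fun x => x))

-- ===== VERDICT (by name: the statement is the Claim_ definition above) =====
theorem degree_sequence_spec : Claim_equal_degree_sequence := by
  intro g _
  unfold Spec_degree_sequence
  have hA := pvA_eq_sorted_raw g
  have hApw : (degree_sequence g).Pairwise (fun a b => b ≤ a) := by
    rw [hA]; exact PySem.List.sorted_pairwise_rev _ _
  have hAperm : (degree_sequence g).Perm (pvRaw g) := by
    rw [hA]; exact PySem.List.sorted_perm _ _ _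
  have hperm : (degree_sequence g).Perm (degree_sequence_alt g) :=
    hAperm.trans (pvB_perm_raw g).symm
  refine PySem.List.eq_of_perm_of_pairwise_le_of_injective (fun x : Int => -x)
    (fun a b h => by simpa using h) hperm ?_ ?_
  · exact hApw.imp (fun h => by simpa using h)
  · exact (pvB_pairwise g).imp (fun h => by simpa using h)
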